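-- pv_equiv track=rewrite | github.com/Project-Notely/notely-ml | app/services/page_analyzer/engines/trocr_processor.py | _merge_adjacent_regions
-- ===== SOURCE A (Python) =====
-- def _merge_adjacent_regions(
--     regions: list[list[int]], target_count: int
-- ) -> list[list[int]]:
--     """Merge adjacent regions to match word count"""
--     if len(regions) <= target_count:
--         return regions
--
--     merged = regions.copy()
--
--     while len(merged) > target_count:
--         # Find the closest pair of regions
--         min_gap = float("inf")
--         merge_idx = 0
--
--         for i in range(len(merged) - 1):
--             gap = merged[i + 1][0] - (merged[i][0] + merged[i][2])
--             if gap < min_gap: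
--                 min_gap = gap
--                 merge_idx = i
--
--         # Merge the pair
--         region1 = merged[merge_idx]
--         region2 = merged[merge_idx + 1]
--
--         merged_x = region1[0]
--         merged_y = min(region1[1], region2[1])
--         merged_w = (region2[0] + region2[2]) - region1[0]
--         merged_h = max(region1[1] + region1[3], region2[1] + region2[3]) - merged_y
--
--         merged[merge_idx] = [merged_x, merged_y, merged_w, merged_h]
--         merged.pop(merge_idx + 1)
--
--     return merged
-- ===== SOURCE B (Python) =====
-- def _merge_group(group):
--     if len(group) == 1:
--         return group[0]
--     x = group[0][0]
--     y = min(r[1] for r in group)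
--     w = group[-1][0] + group[-1][2] - x
--     h = max(r[1] + r[3] for r in group) - y
--     return [x, y, w, h]
--
--
-- def _merge_adjacent_regions(
--     regions: list[list[int]], target_count: int
-- ) -> list[list[int]]:
--     """Merge adjacent regions to match word count.
--
--     Gaps between adjacent blocks never change as blocks merge, so the
--     repeated closest-pair merging is equivalent to deleting the
--     n - target_count smallest boundary gaps (ties leftmost first) once,
--     then collapsing each resulting run of regions in one pass.
--     """
--     n = len(regions)
--     if n <= target_count:
--         return regions
--     order = sorted(range(n - 1),
--                    key=lambda i: (regions[i + 1][0] - (regions[i][0] + regions[i][2]), i))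
--     removed = set(order[: n - target_count])
--     out, start = [], 0
--     for cut in [i for i in range(n - 1) if i not in removed] + [n - 1]:
--         out.append(_merge_group(regions[start:cut + 1]))
--         start = cut + 1
--     return out
-- ===== Notes on version B (the rewrite author's own statement) =====
-- stated objective: alternative
-- what changed: B exploits that boundary gaps are invariant under merging: instead of A's repeated argmin scan + pop per merge, B sorts the n-1 gaps once, deletes the n-target smallest boundaries (ties leftmost), and collapses each surviving run of regions in one closed-form pass.
import Mathlib
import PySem

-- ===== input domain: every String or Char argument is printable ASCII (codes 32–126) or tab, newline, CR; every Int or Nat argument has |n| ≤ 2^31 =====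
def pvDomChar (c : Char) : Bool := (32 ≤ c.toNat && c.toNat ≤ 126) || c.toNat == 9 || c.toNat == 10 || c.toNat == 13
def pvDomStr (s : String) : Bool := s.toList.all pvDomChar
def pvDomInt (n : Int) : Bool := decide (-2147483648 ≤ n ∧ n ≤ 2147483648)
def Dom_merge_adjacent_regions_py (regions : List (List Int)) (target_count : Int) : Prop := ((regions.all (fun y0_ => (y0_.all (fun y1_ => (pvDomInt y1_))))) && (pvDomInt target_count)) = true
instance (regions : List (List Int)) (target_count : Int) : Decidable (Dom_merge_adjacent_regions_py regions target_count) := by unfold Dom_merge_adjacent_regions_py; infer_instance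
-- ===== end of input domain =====

-- B replaces A's repeated closest-pair scan-and-merge loop by a single sort of the
-- (merge-invariant) boundary gaps followed by one grouping pass; same return value on Pre_.


-- ===== PORT A =====
-- gap = merged[i+1][0] - (merged[i][0] + merged[i][2]); the getD defaults are never reached
-- under Pre_ (all indices in range there), where the port is exact.
def pvGapA (merged : List (List Int)) (i : Nat) : Int :=
  ((merged.getD (i+1) []).getD 0 0) - (((merged.getD i []).getD 0 0) + ((merged.getD i []).getD 2 0))

-- the inner 'for i in range(len(merged)-1)' scan; min_gap = float("inf") is the 'none' state
def pvArgminA (merged : List (List Int)) : Nat :=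
  ((List.range (merged.length - 1)).foldl
    (fun (st : Option Int × Nat) i =>
      match st.1 with
      | none => (some (pvGapA merged i), i)
      | some m => if pvGapA merged i < m then (some (pvGapA merged i), i) else st)
    (none, 0)).2

-- the merged [merged_x, merged_y, merged_w, merged_h] record
def pvMergePair (r1 r2 : List Int) : List Int :=
  [r1.getD 0 0,
   min (r1.getD 1 0) (r2.getD 1 0),
   r2.getD 0 0 + r2.getD 2 0 - r1.getD 0 0,
   max (r1.getD 1 0 + r1.getD 3 0) (r2.getD 1 0 + r2.getD 3 0) - min (r1.getD 1 0) (r2.getD 1 0)]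

-- the while-loop; fuel n suffices since each pass pops one element (n - target ≤ n passes).
-- merged[mi] = …; merged.pop(mi+1) → set / eraseIdx (in range under Pre_, where this is exact)
def pvLoopA : Nat → Int → List (List Int) → List (List Int)
  | 0, _, merged => merged
  | f+1, target, merged =>
    if target < (merged.length : Int) then
      pvLoopA f target
        ((merged.set (pvArgminA merged)
            (pvMergePair (merged.getD (pvArgminA merged) [])
                         (merged.getD (pvArgminA merged + 1) []))).eraseIdx (pvArgminA merged + 1))
    else merged

def merge_adjacent_regions_py (regions : List (List Int)) (target_count : Int) : List (List Int) :=
  if (regions.length : Int) ≤ target_count then regions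
  else pvLoopA regions.length target_count regions

-- ===== PORT B =====
-- min()/max() of a nonempty iterable (B only applies them to nonempty groups)
def pvMinInt : List Int → Int
  | [] => 0
  | a :: l => l.foldl min a

def pvMaxInt : List Int → Int
  | [] => 0
  | a :: l => l.foldl max a

-- _merge_group: collapse one run of regions
def pvGroupMergeB (group : List (List Int)) : List Int :=
  if group.length = 1 then group.getD 0 []
  else
    [(group.getD 0 []).getD 0 0,
     pvMinInt (group.map (fun r => r.getD 1 0)),
     (group.getLastD []).getD 0 0 + (group.getLastD []).getD 2 0 - (group.getD 0 []).getD 0 0,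
     pvMaxInt (group.map (fun r => r.getD 1 0 + r.getD 3 0))
       - pvMinInt (group.map (fun r => r.getD 1 0))]

def merge_adjacent_regions_py_alt (regions : List (List Int)) (target_count : Int) : List (List Int) :=
  if (regions.length : Int) ≤ target_count then regions
  else
    -- order = sorted(range(n-1), key=lambda i: (gap_i, i))
    let order := PySem.List.sorted2 (List.range (regions.length - 1))
                   (fun i => (regions.getD (i+1) []).getD 0 0
                               - (((regions.getD i []).getD 0 0) + ((regions.getD i []).getD 2 0)))
                   (fun i => i)
    -- removed = set(order[: n - target_count])
    let removed := PySem.Set.ofList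
                     (PySem.List.slice order none (some ((regions.length : Int) - target_count)))
    -- cuts = [i for i in range(n-1) if i not in removed] + [n-1]
    let cuts := (List.range (regions.length - 1)).filter (fun i => !(removed.contains i))
                  ++ [regions.length - 1]
    -- out/start accumulation loop; regions[start:cut+1] is a slice
    (cuts.foldl
      (fun (st : List (List Int) × Nat) (cut : Nat) =>
        (st.1 ++ [pvGroupMergeB (PySem.List.slice regions (some (st.2 : Int)) (some ((cut : Int) + 1)))],
         cut + 1))
      ([], 0)).1

-- ===== PRECONDITION & SPEC =====
-- Pre_ excludes inputs where merging is required (len(regions) > target_count) but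
-- target_count < 1 or some region has fewer than 4 coordinates: there Python A raises IndexError
-- (except in the corner where every short region happens never to participate in any merge —
-- those returning inputs are also excluded, since whether A returns is not a closed-form condition).
def Pre_merge_adjacent_regions_py (regions : List (List Int)) (target_count : Int) : Prop :=
  (regions.length : Int) ≤ target_count ∨
    (1 ≤ target_count ∧ ∀ r ∈ regions, 4 ≤ r.length)
instance (regions : List (List Int)) (target_count : Int) : Decidable (Pre_merge_adjacent_regions_py regions target_count) := by unfold Pre_merge_adjacent_regions_py; infer_instance

def pvWitness_merge_adjacent_regions_py : List (List Int) × Int :=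
  ([[0, 0, 1, 1], [10, 0, 1, 1], [12, 0, 1, 1]], 2)

def Spec_merge_adjacent_regions_py (regions : List (List Int)) (target_count : Int) (out : List (List Int)) : Prop := out = merge_adjacent_regions_py_alt regions target_count
instance (regions : List (List Int)) (target_count : Int) (out : List (List Int)) : Decidable (Spec_merge_adjacent_regions_py regions target_count out) := by unfold Spec_merge_adjacent_regions_py; infer_instance

-- ===== CLAIM (what is proved, stated in full; the proofs are below) =====
def Claim_equal_merge_adjacent_regions_py : Prop := ∀ (regions : List (List Int)) (target_count : Int), Dom_merge_adjacent_regions_py regions target_count → Pre_merge_adjacent_regions_py regions target_count → Spec_merge_adjacent_regions_py regions target_count (merge_adjacent_regions_py regions target_count)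

-- ===== LEMMAS AND PROOFS =====
def pvGapB (regions : List (List Int)) (i : Nat) : Int :=
  (regions.getD (i+1) []).getD 0 0
    - (((regions.getD i []).getD 0 0) + ((regions.getD i []).getD 2 0))

theorem gm_getD0 (g : List (List Int)) :
    (pvGroupMergeB g).getD 0 0 = (g.getD 0 []).getD 0 0 := by
  unfold pvGroupMergeB; split <;> rfl

theorem gm_extent (g : List (List Int)) (hg : g ≠ []) :
    (pvGroupMergeB g).getD 0 0 + (pvGroupMergeB g).getD 2 0
      = (g.getLastD []).getD 0 0 + (g.getLastD []).getD 2 0 := by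
  unfold pvGroupMergeB
  split
  · next h => match g, h with | [r], _ => simp
  · simp

theorem gm_getD1 (g : List (List Int)) (hg : g ≠ []) :
    (pvGroupMergeB g).getD 1 0 = pvMinInt (g.map (fun r => r.getD 1 0)) := by
  unfold pvGroupMergeB
  split
  · next h => match g, h with | [r], _ => simp [pvMinInt]
  · rfl

theorem gm_sum13 (g : List (List Int)) (hg : g ≠ []) :
    (pvGroupMergeB g).getD 1 0 + (pvGroupMergeB g).getD 3 0
      = pvMaxInt (g.map (fun r => r.getD 1 0 + r.getD 3 0)) := by
  unfold pvGroupMergeB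
  split
  · next h => match g, h with | [r], _ => simp [pvMaxInt]
  · simp

theorem pvMinInt_append (l1 l2 : List Int) (h1 : l1 ≠ []) (h2 : l2 ≠ []) :
    pvMinInt (l1 ++ l2) = min (pvMinInt l1) (pvMinInt l2) := by
  match l1, l2 with
  | a :: t1, b :: t2 =>
    show ((t1 ++ b :: t2).foldl min a) = min (t1.foldl min a) (t2.foldl min b)
    rw [List.foldl_append]
    show ((t2.foldl min (min (t1.foldl min a) b))) = _
    rw [List.foldl_assoc]

theorem pvMaxInt_append (l1 l2 : List Int) (h1 : l1 ≠ []) (h2 : l2 ≠ []) :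
    pvMaxInt (l1 ++ l2) = max (pvMaxInt l1) (pvMaxInt l2) := by
  match l1, l2 with
  | a :: t1, b :: t2 =>
    show ((t1 ++ b :: t2).foldl max a) = max (t1.foldl max a) (t2.foldl max b)
    rw [List.foldl_append]
    show ((t2.foldl max (max (t1.foldl max a) b))) = _
    rw [List.foldl_assoc]

theorem gm_append (g1 g2 : List (List Int)) (h1 : g1 ≠ []) (h2 : g2 ≠ []) :
    pvMergePair (pvGroupMergeB g1) (pvGroupMergeB g2) = pvGroupMergeB (g1 ++ g2) := by
  have hlen : (g1 ++ g2).length ≠ 1 := by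
    have := List.length_pos_of_ne_nil h1
    have := List.length_pos_of_ne_nil h2
    simp; omega
  have hh : pvGroupMergeB (g1 ++ g2) =
      [((g1 ++ g2).getD 0 []).getD 0 0,
       pvMinInt ((g1 ++ g2).map (fun r => r.getD 1 0)),
       ((g1 ++ g2).getLastD []).getD 0 0 + ((g1 ++ g2).getLastD []).getD 2 0
         - ((g1 ++ g2).getD 0 []).getD 0 0,
       pvMaxInt ((g1 ++ g2).map (fun r => r.getD 1 0 + r.getD 3 0))
         - pvMinInt ((g1 ++ g2).map (fun r => r.getD 1 0))] := by
    unfold pvGroupMergeB; rw [if_neg hlen]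
  rw [hh]
  unfold pvMergePair
  rw [gm_sum13 _ h1, gm_sum13 _ h2, gm_getD1 _ h1, gm_getD1 _ h2, gm_getD0 g1,
      gm_extent g2 h2]
  have e1 : ((g1 ++ g2).getD 0 []) = g1.getD 0 [] := by
    match g1, h1 with | a :: t, _ => rfl
  have e2 : ((g1 ++ g2).getLastD []) = g2.getLastD [] := by
    rw [List.getLastD_eq_getLast?, List.getLast?_append_of_ne_nil g1 h2, ← List.getLastD_eq_getLast?]
  have e3 : pvMinInt ((g1 ++ g2).map (fun r => r.getD 1 0))
      = min (pvMinInt (g1.map (fun r => r.getD 1 0))) (pvMinInt (g2.map (fun r => r.getD 1 0))) := by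
    rw [List.map_append, pvMinInt_append] <;> simp [h1, h2]
  have e4 : pvMaxInt ((g1 ++ g2).map (fun r => r.getD 1 0 + r.getD 3 0))
      = max (pvMaxInt (g1.map (fun r => r.getD 1 0 + r.getD 3 0)))
            (pvMaxInt (g2.map (fun r => r.getD 1 0 + r.getD 3 0))) := by
    rw [List.map_append, pvMaxInt_append] <;> simp [h1, h2]
  rw [e1, e2, e3, e4]

-- helpers
theorem getD_drop0 (R : List (List Int)) (s : Nat) : (R.drop s).getD 0 [] = R.getD s [] := by
  simp [List.getD_eq_getElem?_getD, List.getElem?_drop]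

theorem getD_take_drop0 (R : List (List Int)) (s t : Nat) (ht : 0 < t) :
    ((R.drop s).take t).getD 0 [] = R.getD s [] := by
  simp [List.getD_eq_getElem?_getD, ht, List.getElem?_drop]

theorem lastD_take_drop (R : List (List Int)) (s c : Nat) (hsc : s ≤ c) (hc : c < R.length) :
    ((R.drop s).take (c+1-s)).getLastD [] = R.getD c [] := by
  rw [List.getLastD_eq_getLast?, List.getLast?_eq_getElem?]
  simp [List.getD_eq_getElem?_getD, List.getElem?_take, List.getElem?_drop, List.length_take,
    List.length_drop]
  rw [if_pos (by omega)]
  have : s + (min (c + 1 - s) (R.length - s) - 1) = c := by omega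
  rw [this]

theorem drop_ne_nil (R : List (List Int)) (s : Nat) (hs : s < R.length) : R.drop s ≠ [] := by
  simp [List.drop_eq_nil_iff]; omega

theorem take_drop_ne_nil (R : List (List Int)) (s t : Nat) (hs : s < R.length) (ht : 0 < t) :
    (R.drop s).take t ≠ [] := by
  simp [List.take_eq_nil_iff, List.drop_eq_nil_iff]; omega

def pvGrouping (R : List (List Int)) : Nat → List Nat → List (List (List Int))
  | s, [] => [R.drop s]
  | s, c :: cs => (R.drop s).take (c + 1 - s) :: pvGrouping R (c + 1) cs

def pvOk (n s : Nat) (cuts : List Nat) : Prop :=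
  cuts.Pairwise (· < ·) ∧ ∀ c ∈ cuts, s ≤ c ∧ c + 1 < n

theorem pvOk_tail (n s c : Nat) (cs : List Nat) (hok : pvOk n s (c :: cs)) : pvOk n (c+1) cs := by
  obtain ⟨hp, hb⟩ := hok
  rw [List.pairwise_cons] at hp
  exact ⟨hp.2, fun c' hc' => ⟨hp.1 c' hc', (hb c' (List.mem_cons_of_mem _ hc')).2⟩⟩

theorem pvGrouping_length (R : List (List Int)) (s : Nat) (cuts : List Nat) :
    (pvGrouping R s cuts).length = cuts.length + 1 := by
  induction cuts generalizing s with
  | nil => rfl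
  | cons c cs ih => simp [pvGrouping, ih]

theorem pvGrouping_head0 (R : List (List Int)) (s : Nat) (cuts : List Nat)
    (hok : pvOk R.length s cuts) (hs : s < R.length) :
    ((((pvGrouping R s cuts).map pvGroupMergeB).getD 0 []).getD 0 0)
      = (R.getD s []).getD 0 0 := by
  cases cuts with
  | nil =>
    show (pvGroupMergeB (R.drop s)).getD 0 0 = _
    rw [gm_getD0, getD_drop0]
  | cons c cs =>
    show (pvGroupMergeB ((R.drop s).take (c+1-s))).getD 0 0 = _
    rw [gm_getD0, getD_take_drop0]
    have := (hok.2 c (List.mem_cons_self)).1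
    omega

theorem pvGrouping_gap (R : List (List Int)) (s : Nat) (cuts : List Nat) (j : Nat)
    (hok : pvOk R.length s cuts) (hs : s < R.length) (hj : j < cuts.length) :
    pvGapA ((pvGrouping R s cuts).map pvGroupMergeB) j = pvGapB R (cuts.getD j 0) := by
  induction cuts generalizing s j with
  | nil => simp at hj
  | cons c cs ih =>
    have hsc := (hok.2 c (List.mem_cons_self)).1
    have hcn := (hok.2 c (List.mem_cons_self)).2
    cases j with
    | zero =>
      show pvGapA (pvGroupMergeB ((R.drop s).take (c+1-s))
          :: (pvGrouping R (c+1) cs).map pvGroupMergeB) 0 = pvGapB R c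
      unfold pvGapA
      rw [List.getD_cons_succ, List.getD_cons_zero]
      have hext := gm_extent ((R.drop s).take (c+1-s)) (take_drop_ne_nil R s _ hs (by omega))
      rw [lastD_take_drop R s c hsc (by omega)] at hext
      have hhead := pvGrouping_head0 R (c+1) cs (pvOk_tail _ _ _ _ hok) (by omega)
      unfold pvGapB
      omega
    | succ j' =>
      show pvGapA (pvGroupMergeB ((R.drop s).take (c+1-s))
          :: (pvGrouping R (c+1) cs).map pvGroupMergeB) (j'+1) = _
      have : pvGapA (pvGroupMergeB ((R.drop s).take (c+1-s))
          :: (pvGrouping R (c+1) cs).map pvGroupMergeB) (j'+1)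
          = pvGapA ((pvGrouping R (c+1) cs).map pvGroupMergeB) j' := by
        unfold pvGapA
        rw [List.getD_cons_succ, List.getD_cons_succ]
      rw [this, List.getD_cons_succ]
      exact ih (c+1) j' (pvOk_tail _ _ _ _ hok) (by omega) (by simpa using hj)

theorem take_drop_append (R : List (List Int)) (s a b : Nat) (hab : s ≤ a) (hbb : a ≤ b) :
    (R.drop s).take (a - s) ++ (R.drop a).take (b - a) = (R.drop s).take (b - s) := by
  have h1 : b - s = (a - s) + (b - a) := by omega
  rw [h1, List.take_add, List.drop_drop]
  have h2 : s + (a - s) = a := by omega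
  rw [h2]

theorem take_drop_append_all (R : List (List Int)) (s a : Nat) (hab : s ≤ a) :
    (R.drop s).take (a - s) ++ R.drop a = R.drop s := by
  have : R.drop a = (R.drop s).drop (a - s) := by rw [List.drop_drop]; congr 1; omega
  rw [this, List.take_append_drop]

theorem pvGrouping_merge_step (R : List (List Int)) (s : Nat) (cuts : List Nat) (j : Nat)
    (hok : pvOk R.length s cuts) (hs : s < R.length) (hj : j < cuts.length) :
    ((((pvGrouping R s cuts).map pvGroupMergeB).set j
        (pvMergePair (((pvGrouping R s cuts).map pvGroupMergeB).getD j [])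
                     (((pvGrouping R s cuts).map pvGroupMergeB).getD (j+1) []))).eraseIdx (j+1))
      = (pvGrouping R s (cuts.eraseIdx j)).map pvGroupMergeB := by
  induction cuts generalizing s j with
  | nil => simp at hj
  | cons c cs ih =>
    have hsc := (hok.2 c (List.mem_cons_self)).1
    have hcn := (hok.2 c (List.mem_cons_self)).2
    cases j with
    | zero =>
      cases cs with
      | nil =>
        rw [show pvGrouping R s [c] = [(R.drop s).take (c+1-s), R.drop (c+1)] from rfl,
            show ([c].eraseIdx 0) = [] from rfl,
            show pvGrouping R s [] = [R.drop s] from rfl]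
        simp only [List.map_cons, List.map_nil, List.set_cons_zero, List.eraseIdx,
          List.getD_cons_zero, List.getD_cons_succ]
        rw [gm_append _ _ (take_drop_ne_nil R s _ hs (by omega)) (drop_ne_nil R _ (by omega))]
        rw [show (c+1-s) = (c+1)-s from rfl, take_drop_append_all R s (c+1) (by omega)]
      | cons c' cs' =>
        have hsc' : c < c' := (List.pairwise_cons.1 hok.1).1 c' (List.mem_cons_self)
        have hc'n := (hok.2 c' (List.mem_cons_of_mem _ (List.mem_cons_self))).2
        rw [show pvGrouping R s (c :: c' :: cs') = (R.drop s).take (c+1-s)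
              :: (R.drop (c+1)).take (c'+1-(c+1)) :: pvGrouping R (c'+1) cs' from rfl,
            show ((c :: c' :: cs').eraseIdx 0) = c' :: cs' from rfl,
            show pvGrouping R s (c' :: cs') = (R.drop s).take (c'+1-s) :: pvGrouping R (c'+1) cs' from rfl]
        simp only [List.map_cons, List.set_cons_zero, List.eraseIdx,
          List.getD_cons_zero, List.getD_cons_succ]
        rw [gm_append _ _ (take_drop_ne_nil R s _ hs (by omega))
          (take_drop_ne_nil R (c+1) _ (by omega) (by omega))]
        rw [show (c+1-s) = (c+1)-s from rfl, show (c'+1-(c+1)) = (c'+1)-(c+1) from rfl,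
            take_drop_append R s (c+1) (c'+1) (by omega) (by omega)]
    | succ j' =>
      rw [show pvGrouping R s (c :: cs) = (R.drop s).take (c+1-s) :: pvGrouping R (c+1) cs from rfl]
      simp only [List.map_cons]
      rw [List.getD_cons_succ, List.getD_cons_succ, List.set_cons_succ, List.eraseIdx_cons_succ]
      rw [show ((c :: cs).eraseIdx (j'+1)) = c :: cs.eraseIdx j' from rfl]
      rw [show pvGrouping R s (c :: cs.eraseIdx j')
          = (R.drop s).take (c+1-s) :: pvGrouping R (c+1) (cs.eraseIdx j') from rfl]
      simp only [List.map_cons]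
      congr 1
      exact ih (c+1) j' (pvOk_tail _ _ _ _ hok) (by omega) (by simpa using hj)

theorem pvGrouping_range' (R : List (List Int)) :
    ∀ (m s : Nat), s + m + 1 = R.length →
      (pvGrouping R s (List.range' s m)).map pvGroupMergeB = R.drop s := by
  intro m
  induction m with
  | zero =>
    intro s hs
    show [pvGroupMergeB (R.drop s)] = R.drop s
    have hlen : (R.drop s).length = 1 := by simp [List.length_drop]; omega
    match hd : R.drop s, hlen with
    | [r], _ => simp [pvGroupMergeB]
  | succ m ih =>
    intro s hs
    show pvGroupMergeB ((R.drop s).take (s+1-s)) :: (pvGrouping R (s+1) (List.range' (s+1) m)).map pvGroupMergeB = R.drop s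
    rw [ih (s+1) (by omega)]
    have hslt : s < R.length := by omega
    have h1 : (R.drop s).take (s+1-s) = [R[s]] := by
      simp [List.take_one, List.head?_drop, List.getElem?_eq_getElem, hslt]
    rw [h1, List.drop_eq_getElem_cons hslt]
    simp [pvGroupMergeB]

theorem pvGrouping_range (R : List (List Int)) (h : 0 < R.length) :
    (pvGrouping R 0 (List.range (R.length - 1))).map pvGroupMergeB = R := by
  rw [List.range_eq_range']
  have := pvGrouping_range' R (R.length - 1) 0 (by omega)
  simpa using this

theorem pvArgminA_fold (merged : List (List Int)) (m : Nat) (hm : 0 < m) :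
    ∃ μ a, ((List.range m).foldl
      (fun (st : Option Int × Nat) i =>
        match st.1 with
        | none => (some (pvGapA merged i), i)
        | some mg => if pvGapA merged i < mg then (some (pvGapA merged i), i) else st)
      (none, 0)) = (some μ, a) ∧ a < m ∧ pvGapA merged a = μ ∧
      (∀ j < m, μ ≤ pvGapA merged j) ∧ (∀ j < a, μ < pvGapA merged j) := by
  induction m with
  | zero => omega
  | succ m ih =>
    by_cases hm0 : 0 < m
    · obtain ⟨μ, a, heq, ha, hgap, hmin, hfirst⟩ := ih hm0
      rw [List.range_succ, List.foldl_append, heq]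
      simp only [List.foldl_cons, List.foldl_nil]
      by_cases hlt : pvGapA merged m < μ
      · refine ⟨pvGapA merged m, m, by simp [hlt], by omega, rfl, ?_, ?_⟩
        · intro j hj
          rcases Nat.lt_succ_iff_lt_or_eq.1 hj with h | h
          · exact le_of_lt (lt_of_lt_of_le hlt (hmin j h))
          · subst h; rfl
        · intro j hj
          exact lt_of_lt_of_le hlt (hmin j hj)
      · refine ⟨μ, a, by simp [hlt], by omega, hgap, ?_, hfirst⟩
        intro j hj
        rcases Nat.lt_succ_iff_lt_or_eq.1 hj with h | h
        · exact hmin j h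
        · subst h; omega
    · have hm1 : m = 0 := by omega
      subst hm1
      exact ⟨pvGapA merged 0, 0, rfl, by omega, rfl, by intro j hj; interval_cases j; rfl, by omega⟩

theorem pvArgminA_eq (merged : List (List Int)) (j : Nat)
    (hj : j + 1 < merged.length)
    (hmin : ∀ j', j' + 1 < merged.length → pvGapA merged j ≤ pvGapA merged j')
    (hfirst : ∀ j', j' < j → pvGapA merged j < pvGapA merged j') :
    pvArgminA merged = j := by
  obtain ⟨μ, a, heq, ha, hgap, hminf, hfirstf⟩ :=
    pvArgminA_fold merged (merged.length - 1) (by omega)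
  unfold pvArgminA
  rw [heq]
  show a = j
  have h1 : μ ≤ pvGapA merged j := hminf j (by omega)
  have h2 : pvGapA merged j ≤ pvGapA merged a := hmin a (by omega)
  rcases lt_trichotomy a j with h | h | h
  · have := hfirst a h
    omega
  · exact h
  · have := hfirstf j h
    omega

theorem sorted2_eq_sorted_toLex {α κ₁ κ₂ : Type} [LinearOrder κ₁] [LinearOrder κ₂]
    (xs : List α) (k1 : α → κ₁) (k2 : α → κ₂) :
    PySem.List.sorted2 xs k1 k2 = PySem.List.sorted xs (fun x => toLex (k1 x, k2 x)) := by
  have hb : (fun a b => decide (k1 a < k1 b) || (!decide (k1 b < k1 a) && decide (k2 a < k2 b)))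
      = (fun a b => decide ((fun x => toLex (k1 x, k2 x)) a < (fun x => toLex (k1 x, k2 x)) b)) := by
    funext a b
    rcases lt_trichotomy (k1 a) (k1 b) with h | h | h
    · simp [Prod.Lex.toLex_lt_toLex, h, not_lt_of_gt h]
    · simp [Prod.Lex.toLex_lt_toLex, h, lt_irrefl]
    · simp [Prod.Lex.toLex_lt_toLex, h, not_lt_of_gt h, ne_of_gt h]
  unfold PySem.List.sorted2 PySem.List.sorted
  simp only [if_neg (by decide : ¬((false : Bool) = true))]
  rw [hb]

def pvKey (R : List (List Int)) (i : Nat) : Lex (Int × Nat) := toLex (pvGapB R i, i)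

def pvOrder (R : List (List Int)) : List Nat :=
  PySem.List.sorted2 (List.range (R.length - 1))
    (fun i => (R.getD (i+1) []).getD 0 0
        - (((R.getD i []).getD 0 0) + ((R.getD i []).getD 2 0))) (fun i => i)

theorem pvOrder_eq_sorted (R : List (List Int)) :
    pvOrder R = PySem.List.sorted (List.range (R.length - 1)) (pvKey R) := by
  unfold pvOrder pvKey pvGapB
  exact sorted2_eq_sorted_toLex _ _ _

theorem pvOrder_perm (R : List (List Int)) : (pvOrder R).Perm (List.range (R.length - 1)) := by
  rw [pvOrder_eq_sorted]; exact PySem.List.sorted_perm _ _ _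

theorem pvOrder_nodup (R : List (List Int)) : (pvOrder R).Nodup :=
  (pvOrder_perm R).nodup_iff.2 (List.nodup_range)

theorem pvOrder_length (R : List (List Int)) : (pvOrder R).length = R.length - 1 := by
  simpa using (pvOrder_perm R).length_eq

theorem pvKey_inj (R : List (List Int)) (a b : Nat) (h : pvKey R a = pvKey R b) : a = b := by
  unfold pvKey at h
  have := congrArg (fun x => (ofLex x).2) h
  simpa using this

theorem pvOrder_pairwise (R : List (List Int)) :
    (pvOrder R).Pairwise (fun a b => pvKey R a < pvKey R b) := by
  have hle : (pvOrder R).Pairwise (fun a b => pvKey R a ≤ pvKey R b) := by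
    rw [pvOrder_eq_sorted]; exact PySem.List.sorted_pairwise _ _
  have hne : (pvOrder R).Pairwise (fun a b => a ≠ b) := pvOrder_nodup R
  exact (hle.and hne).imp (fun {a b} h => lt_of_le_of_ne h.1 (fun he => h.2 (pvKey_inj R a b he)))

def pvKept (R : List (List Int)) (k : Nat) : List Nat :=
  (List.range (R.length - 1)).filter
    (fun i => !(((pvOrder R).take k).contains i))

theorem pvKept_zero (R : List (List Int)) : pvKept R 0 = List.range (R.length - 1) := by
  simp [pvKept]

theorem pvKept_mem (R : List (List Int)) (k : Nat) (i : Nat) :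
    i ∈ pvKept R k ↔ i ∈ (pvOrder R).drop k := by
  have hsplit : pvOrder R = (pvOrder R).take k ++ (pvOrder R).drop k := (List.take_append_drop _ _).symm
  have hnd := pvOrder_nodup R
  have hdisj : ∀ a, a ∈ (pvOrder R).take k → a ∉ (pvOrder R).drop k := by
    intro a ha hd
    exact List.disjoint_left.1 (List.disjoint_take_drop hnd (le_refl k)) ha hd
  constructor
  · intro h
    rw [pvKept, List.mem_filter] at h
    obtain ⟨hr, hc⟩ := h
    have hio : i ∈ pvOrder R := ((pvOrder_perm R).mem_iff).2 (by simpa using hr)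
    rw [hsplit, List.mem_append] at hio
    rcases hio with h | h
    · simp [List.contains_iff_mem] at hc
      exact absurd h hc
    · exact h
  · intro h
    rw [pvKept, List.mem_filter]
    have hio : i ∈ pvOrder R := by rw [hsplit, List.mem_append]; right; exact h
    refine ⟨by simpa using ((pvOrder_perm R).mem_iff).1 hio, ?_⟩
    simp [List.contains_iff_mem]
    intro hmem
    exact absurd h (hdisj i hmem)

theorem pvKept_pairwise (R : List (List Int)) (k : Nat) :
    (pvKept R k).Pairwise (· < ·) :=
  List.Pairwise.sublist List.filter_sublist List.pairwise_lt_range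

theorem pvKept_nodup (R : List (List Int)) (k : Nat) : (pvKept R k).Nodup :=
  (pvKept_pairwise R k).imp (fun h => Nat.ne_of_lt h)

theorem pvKept_ok (R : List (List Int)) (k : Nat) : pvOk R.length 0 (pvKept R k) := by
  refine ⟨pvKept_pairwise R k, fun c hc => ⟨Nat.zero_le _, ?_⟩⟩
  rw [pvKept, List.mem_filter] at hc
  have := List.mem_range.1 hc.1
  omega

theorem pvKept_length (R : List (List Int)) (k : Nat) :
    (pvKept R k).length = (R.length - 1) - k := by
  have hperm : (pvKept R k).Perm ((pvOrder R).drop k) := by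
    rw [List.perm_ext_iff_of_nodup (pvKept_nodup R k) (List.Nodup.sublist (List.drop_sublist _ _) (pvOrder_nodup R))]
    exact pvKept_mem R k
  rw [hperm.length_eq, List.length_drop, pvOrder_length]

theorem pvKept_step (R : List (List Int)) (k : Nat) (hk : k < R.length - 1) :
    ((pvOrder R).getD k 0) ∈ pvKept R k ∧
    (∀ c ∈ pvKept R k, c ≠ (pvOrder R).getD k 0 →
        pvKey R ((pvOrder R).getD k 0) < pvKey R c) ∧
    pvKept R (k+1) = (pvKept R k).eraseIdx ((pvKept R k).idxOf ((pvOrder R).getD k 0)) := by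
  have hkl : k < (pvOrder R).length := by rw [pvOrder_length]; omega
  set b := (pvOrder R).getD k 0 with hb
  have hbg : (pvOrder R).getD k 0 = (pvOrder R)[k] := List.getD_eq_getElem _ _ hkl
  have hdk : (pvOrder R).drop k = b :: (pvOrder R).drop (k+1) := by
    rw [hb, hbg]; exact List.drop_eq_getElem_cons hkl
  have hmemb : b ∈ pvKept R k := by
    rw [pvKept_mem, hdk]; exact List.mem_cons_self
  refine ⟨hmemb, ?_, ?_⟩
  · intro c hc hne
    have hcd : c ∈ (pvOrder R).drop k := (pvKept_mem R k c).1 hc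
    rw [hdk] at hcd
    rcases List.mem_cons.1 hcd with h | h
    · exact absurd h hne
    · have hpw : ((pvOrder R).drop k).Pairwise (fun a b => pvKey R a < pvKey R b) :=
        List.Pairwise.sublist (List.drop_sublist _ _) (pvOrder_pairwise R)
      rw [hdk, List.pairwise_cons] at hpw
      exact hpw.1 c h
  · have htake : (pvOrder R).take (k+1) = (pvOrder R).take k ++ [b] := by
      rw [List.take_succ]
      simp [List.getElem?_eq_getElem hkl, hb, hbg, Option.toList]
    have hstep : pvKept R (k+1)
        = (List.range (R.length - 1)).filter
            (fun i => (!(((pvOrder R).take k).contains i)) && (i != b)) := by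
      rw [pvKept, htake]
      apply List.filter_congr
      intro i _
      by_cases h : i = b <;> simp [List.contains_append, h, bne]
    rw [List.eraseIdx_idxOf_eq_erase, List.Nodup.erase_eq_filter (pvKept_nodup R k) b, hstep]
    simp only [pvKept]
    rw [List.filter_filter]
    apply List.filter_congr
    intro i _
    rw [Bool.and_comm]

theorem pvStep (R : List (List Int)) (k : Nat) (hn2 : 2 ≤ R.length) (hk : k < R.length - 1) :
    ((((pvGrouping R 0 (pvKept R k)).map pvGroupMergeB).set
        (pvArgminA ((pvGrouping R 0 (pvKept R k)).map pvGroupMergeB))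
        (pvMergePair
          (((pvGrouping R 0 (pvKept R k)).map pvGroupMergeB).getD
            (pvArgminA ((pvGrouping R 0 (pvKept R k)).map pvGroupMergeB)) [])
          (((pvGrouping R 0 (pvKept R k)).map pvGroupMergeB).getD
            (pvArgminA ((pvGrouping R 0 (pvKept R k)).map pvGroupMergeB) + 1) []))).eraseIdx
        (pvArgminA ((pvGrouping R 0 (pvKept R k)).map pvGroupMergeB) + 1))
      = (pvGrouping R 0 (pvKept R (k+1))).map pvGroupMergeB := by
  obtain ⟨hmemb, hminlt, hkept1⟩ := pvKept_step R k hk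
  set b := (pvOrder R).getD k 0 with hbdef
  set cuts := pvKept R k with hcuts
  set merged := (pvGrouping R 0 cuts).map pvGroupMergeB with hmerged
  have hok := pvKept_ok R k
  have hs : 0 < R.length := by omega
  have hlenm : merged.length = cuts.length + 1 := by
    rw [hmerged, List.length_map, pvGrouping_length]
  have hjb : cuts.idxOf b < cuts.length := List.idxOf_lt_length_of_mem hmemb
  have hgetjb : cuts.getD (cuts.idxOf b) 0 = b := by
    rw [List.getD_eq_getElem _ _ hjb]
    exact List.getElem_idxOf (List.idxOf_lt_length_of_mem hmemb)
  have hgap : ∀ j, j < cuts.length → pvGapA merged j = pvGapB R (cuts.getD j 0) := by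
    intro j hj
    exact pvGrouping_gap R 0 cuts j hok hs hj
  have hmemget : ∀ j, j < cuts.length → cuts.getD j 0 ∈ cuts := by
    intro j hj
    rw [List.getD_eq_getElem _ _ hj]
    exact List.getElem_mem _
  have hfstle : ∀ c, c ∈ cuts → pvGapB R b ≤ pvGapB R c := by
    intro c hc
    by_cases hcb : c = b
    · subst hcb; exact le_refl _
    · have := hminlt c hc hcb
      unfold pvKey at this
      rw [Prod.Lex.toLex_lt_toLex] at this
      rcases this with h | h
      · exact le_of_lt h
      · exact le_of_eq h.1
  have harg : pvArgminA merged = cuts.idxOf b := by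
    apply pvArgminA_eq
    · omega
    · intro j' hj'
      have hj'c : j' < cuts.length := by omega
      rw [hgap _ hjb, hgap _ hj'c, hgetjb]
      exact hfstle _ (hmemget _ hj'c)
    · intro j' hj'
      have hj'c : j' < cuts.length := by omega
      rw [hgap _ hjb, hgap _ hj'c, hgetjb]
      have hlt : cuts.getD j' 0 < b := by
        have hpw := pvKept_pairwise R k
        rw [List.pairwise_iff_getElem] at hpw
        have := hpw j' (cuts.idxOf b) (by omega) hjb hj'
        rw [List.getD_eq_getElem _ _ hj'c]
        rw [List.getElem_idxOf (List.idxOf_lt_length_of_mem hmemb)] at this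
        exact this
      have hne : cuts.getD j' 0 ≠ b := by omega
      have := hminlt _ (hmemget _ hj'c) hne
      unfold pvKey at this
      rw [Prod.Lex.toLex_lt_toLex] at this
      rcases this with h | h
      · exact h
      · omega
  rw [harg]
  rw [pvGrouping_merge_step R 0 cuts (cuts.idxOf b) hok hs hjb]
  rw [← hkept1]

theorem pvLoopA_invariant (R : List (List Int)) (t : Int) (ht : 1 ≤ t)
    (hnt : t < (R.length : Int)) :
    ∀ f k, k ≤ R.length - t.toNat → R.length - t.toNat ≤ k + f →
      pvLoopA f t ((pvGrouping R 0 (pvKept R k)).map pvGroupMergeB)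
        = (pvGrouping R 0 (pvKept R (R.length - t.toNat))).map pvGroupMergeB := by
  have hn2 : 2 ≤ R.length := by omega
  intro f
  induction f with
  | zero =>
    intro k hk1 hk2
    have : k = R.length - t.toNat := by omega
    rw [this]
    rfl
  | succ f ih =>
    intro k hk1 hk2
    have hlenm : ((pvGrouping R 0 (pvKept R k)).map pvGroupMergeB).length = R.length - k := by
      rw [List.length_map, pvGrouping_length, pvKept_length]
      omega
    show pvLoopA (f+1) t _ = _
    rw [pvLoopA]
    by_cases hkK : k < R.length - t.toNat
    · rw [if_pos (by rw [hlenm]; omega)]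
      rw [pvStep R k hn2 (by omega)]
      exact ih (k+1) (by omega) (by omega)
    · have hkeq : k = R.length - t.toNat := by omega
      rw [if_neg (by rw [hlenm]; omega)]
      rw [hkeq]

theorem pvFoldB (R : List (List Int)) (m : Nat) (hm : R.length ≤ m + 1) :
    ∀ (cuts : List Nat) (s : Nat) (acc : List (List Int)),
      ((cuts ++ [m]).foldl
        (fun (st : List (List Int) × Nat) (cut : Nat) =>
          (st.1 ++ [pvGroupMergeB (PySem.List.slice R (some (st.2 : Int)) (some ((cut : Int) + 1)))],
           cut + 1))
        (acc, s)).1 = acc ++ (pvGrouping R s cuts).map pvGroupMergeB := by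
  intro cuts
  induction cuts with
  | nil =>
    intro s acc
    simp only [List.nil_append, List.foldl_cons, List.foldl_nil]
    have hc : ((m : Int) + 1) = ((m + 1 : Nat) : Int) := by push_cast; ring
    rw [hc, PySem.List.slice_natCast]
    have : (R.drop s).take (m + 1 - s) = R.drop s := by
      apply List.take_of_length_le
      simp [List.length_drop]
      omega
    rw [this]
    rfl
  | cons c cs ih =>
    intro s acc
    simp only [List.cons_append, List.foldl_cons]
    have hc : ((c : Int) + 1) = ((c + 1 : Nat) : Int) := by push_cast; ring
    rw [hc, PySem.List.slice_natCast, ih]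
    show (acc ++ [pvGroupMergeB ((R.drop s).take (c+1-s))]) ++ _ = _
    rw [List.append_assoc]
    rfl

theorem pv_main (regions : List (List Int)) (target_count : Int)
    (hpre : (regions.length : Int) ≤ target_count ∨ 1 ≤ target_count) :
    merge_adjacent_regions_py regions target_count
      = merge_adjacent_regions_py_alt regions target_count := by
  unfold merge_adjacent_regions_py merge_adjacent_regions_py_alt
  by_cases hle : (regions.length : Int) ≤ target_count
  · rw [if_pos hle, if_pos hle]
  · rw [if_neg hle, if_neg hle]
    dsimp only
    have hnt : target_count < (regions.length : Int) := by omega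
    have ht : 1 ≤ target_count := by
      rcases hpre with h | h
      · exact absurd h hle
      · exact h
    have hn2 : 2 ≤ regions.length := by omega
    set n := regions.length with hn
    set K := n - target_count.toNat with hK
    -- B's order is pvOrder
    have hord : PySem.List.sorted2 (List.range (n - 1))
        (fun i => (regions.getD (i+1) []).getD 0 0
            - (((regions.getD i []).getD 0 0) + ((regions.getD i []).getD 2 0)))
        (fun i => i) = pvOrder regions := rfl
    rw [hord]
    -- B's slice take
    have hslice : PySem.List.slice (pvOrder regions) none (some ((n : Int) - target_count))
        = (pvOrder regions).take K := by
      rw [PySem.List.slice_to _ (by omega)]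
      congr 1
      omega
    rw [hslice]
    -- B's filter is pvKept K
    have hfilt : (List.range (n - 1)).filter
        (fun i => !((PySem.Set.ofList ((pvOrder regions).take K)).contains i))
        = pvKept regions K := by
      apply List.filter_congr
      intro i _
      congr 1
      simp [List.contains_iff_mem, PySem.Set.mem_ofList]
    rw [hfilt]
    -- B's fold is the grouping
    rw [pvFoldB regions (n - 1) (by omega) (pvKept regions K) 0 []]
    rw [List.nil_append]
    -- A's loop
    have hinit : regions = (pvGrouping regions 0 (pvKept regions 0)).map pvGroupMergeB := by
      rw [pvKept_zero, pvGrouping_range regions (by omega)]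
    calc pvLoopA n target_count regions
        = pvLoopA n target_count ((pvGrouping regions 0 (pvKept regions 0)).map pvGroupMergeB) := by
          rw [← hinit]
      _ = (pvGrouping regions 0 (pvKept regions K)).map pvGroupMergeB :=
          pvLoopA_invariant regions target_count ht hnt n 0 (by omega) (by omega)

-- ===== VERDICT (by name: the statement is the Claim_ definition above) =====
theorem merge_adjacent_regions_py_spec : Claim_equal_merge_adjacent_regions_py := by
  intro regions target_count _dom hpre
  unfold Spec_merge_adjacent_regions_py
  exact pv_main regions target_count (hpre.imp id And.left)
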